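-- pv_equiv track=rewrite | github.com/FilouPlains/block_selfies | scripts/fragment_SELFIES.py | calculate_len_connect
-- ===== SOURCE A (Python) =====
-- def get_numeric_value(token):
--     num_dict={
--         "[C]" : 0,
--         "[Ring1]" : 1,
--         "[Ring2]" : 2,
--         "[Branch1]" : 3,
--         "[=Branch1]" : 4,
--         "[#Branch1]" : 5,
--         "[Branch2]" : 6,
--         "[=Branch2]" : 7,
--         "[#Branch2]" : 8,
--         "[O]" : 9,
--         "[N]" : 10,
--         "[=N]" : 11,
--         "[=C]" : 12,
--         "[#C]" : 13,
--         "[S]" : 14,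
--         "[P]" : 15
--     }
--     value = num_dict[token]
--     return value
--
-- def calculate_len_connect(i,nb_num_token,selfies_token):
--     num=0
--     skip_idx=[]
--     for j in range(1,nb_num_token+1):
--         skip_idx.append(i+j)
--         num+=get_numeric_value(selfies_token[i+j]) * (16**(nb_num_token-j))
--     num+=1
--     return num,skip_idx
-- ===== SOURCE B (Python) =====
-- _NUM = {
--     "[C]": 0, "[Ring1]": 1, "[Ring2]": 2, "[Branch1]": 3,
--     "[=Branch1]": 4, "[#Branch1]": 5, "[Branch2]": 6, "[=Branch2]": 7,
--     "[#Branch2]": 8, "[O]": 9, "[N]": 10, "[=N]": 11,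
--     "[=C]": 12, "[#C]": 13, "[S]": 14, "[P]": 15,
-- }
--
-- def calculate_len_connect(i, nb_num_token, selfies_token):
--     def go(j):
--         # value of the first j digit tokens as a base-16 number, plus their indices
--         if j <= 0:
--             return 0, []
--         prefix, idxs = go(j - 1)
--         return prefix * 16 + _NUM[selfies_token[i + j]], idxs + [i + j]
--     num, skip_idx = go(nb_num_token)
--     return num + 1, skip_idx
-- ===== Notes on version B (the rewrite author's own statement) =====
-- stated objective: alternative
-- what changed: B replaces A's for-loop over range(1, nb+1) with positional weights 16**(nb-j) and incremental appends by a recursive helper go(j) that builds the value of the first j digit tokens by Horner's rule (prefix*16 + digit) together with their index list, so no exponentiation is computed at all.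
import Mathlib
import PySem

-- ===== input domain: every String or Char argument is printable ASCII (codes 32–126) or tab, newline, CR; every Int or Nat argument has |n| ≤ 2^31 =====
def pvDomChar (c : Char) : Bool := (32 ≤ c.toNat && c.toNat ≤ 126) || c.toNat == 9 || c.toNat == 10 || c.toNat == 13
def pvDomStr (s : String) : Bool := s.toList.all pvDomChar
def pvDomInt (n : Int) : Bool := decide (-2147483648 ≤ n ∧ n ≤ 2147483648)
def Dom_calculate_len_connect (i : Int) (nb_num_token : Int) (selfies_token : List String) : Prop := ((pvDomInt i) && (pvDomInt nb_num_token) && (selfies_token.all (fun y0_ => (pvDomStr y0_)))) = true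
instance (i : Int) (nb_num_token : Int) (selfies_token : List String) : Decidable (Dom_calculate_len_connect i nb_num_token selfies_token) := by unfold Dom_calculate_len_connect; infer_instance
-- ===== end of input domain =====

-- B replaces A's range loop with per-step 16**(nb-j) weights by a recursive Horner helper
-- (prefix*16 + digit) that returns value and index list together (objective: alternative).


-- ===== PORT A =====
-- num_dict of get_numeric_value; get? = Python dict lookup, none = KeyError
def pvNumDictA : PySem.Dict String Int := PySem.Dict.ofList
  [("[C]", 0), ("[Ring1]", 1), ("[Ring2]", 2), ("[Branch1]", 3),
   ("[=Branch1]", 4), ("[#Branch1]", 5), ("[Branch2]", 6), ("[=Branch2]", 7),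
   ("[#Branch2]", 8), ("[O]", 9), ("[N]", 10), ("[=N]", 11),
   ("[=C]", 12), ("[#C]", 13), ("[S]", 14), ("[P]", 15)]

def get_numeric_value (token : String) : Option Int := pvNumDictA.get? token

-- loop 'for j in range(1, nb_num_token+1)'; Option threads IndexError/KeyError (none), excluded by Pre_
def calculate_len_connect (i : Int) (nb_num_token : Int) (selfies_token : List String) : Int × List Int :=
  let r := (PySem.List.pyRange 1 (nb_num_token + 1) 1).foldl
    (fun acc j =>
      match acc with
      | none => none
      | some (num, skip_idx) =>
        match PySem.List.pyGet? selfies_token (i + j) with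
        | none => none
        | some tok =>
          match get_numeric_value tok with
          | none => none
          | some v => some (num + v * 16 ^ (nb_num_token - j).toNat, skip_idx ++ [i + j]))
    (some ((0 : Int), ([] : List Int)))
  match r with
  | some (num, skip_idx) => (num + 1, skip_idx)
  | none => (0, [])   -- unreachable under Pre_ (the loop raised)

-- ===== PORT B =====
def pvNumDictB : PySem.Dict String Int := PySem.Dict.ofList
  [("[C]", 0), ("[Ring1]", 1), ("[Ring2]", 2), ("[Branch1]", 3),
   ("[=Branch1]", 4), ("[#Branch1]", 5), ("[Branch2]", 6), ("[=Branch2]", 7),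
   ("[#Branch2]", 8), ("[O]", 9), ("[N]", 10), ("[=N]", 11),
   ("[=C]", 12), ("[#C]", 13), ("[S]", 14), ("[P]", 15)]

-- recursive helper go(j): Horner value of the first j digit tokens with their index list;
-- Python's 'if j <= 0: return 0, []' base case becomes the Nat-zero case (go is called on
-- nb_num_token.toNat, which is 0 exactly when nb_num_token <= 0); none = IndexError/KeyError
def pvGoB (i : Int) (selfies_token : List String) : Nat → Option (Int × List Int)
  | 0 => some (0, [])
  | j + 1 =>
    match pvGoB i selfies_token j with
    | none => none
    | some (prefixv, idxs) =>
      match PySem.List.pyGet? selfies_token (i + ((j : Int) + 1)) with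
      | none => none
      | some tok =>
        match pvNumDictB.get? tok with
        | none => none
        | some d => some (prefixv * 16 + d, idxs ++ [i + ((j : Int) + 1)])

def calculate_len_connect_alt (i : Int) (nb_num_token : Int) (selfies_token : List String) : Int × List Int :=
  match pvGoB i selfies_token nb_num_token.toNat with
  | some (num, skip_idx) => (num + 1, skip_idx)
  | none => (0, [])   -- unreachable under Pre_ (go raised)

-- ===== PRECONDITION & SPEC =====
def pvTokens : List String :=
  ["[C]", "[Ring1]", "[Ring2]", "[Branch1]", "[=Branch1]", "[#Branch1]", "[Branch2]", "[=Branch2]",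
   "[#Branch2]", "[O]", "[N]", "[=N]", "[=C]", "[#C]", "[S]", "[P]"]

-- Pre_: every visited position i+j is a valid Python index and holds one of the 16 numeric tokens
-- (exactly where A neither IndexErrors nor KeyErrors); the leading size bound is redundant
-- (validity of indices i+1..i+nb forces nb ≤ 2*len) and only keeps the check quick to decide.
def Pre_calculate_len_connect (i : Int) (nb_num_token : Int) (selfies_token : List String) : Prop :=
  nb_num_token ≤ 2 * selfies_token.length ∧
  ((PySem.List.pyRange 1 (nb_num_token + 1) 1).all (fun j =>
    match PySem.List.pyGet? selfies_token (i + j) with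
    | none => false
    | some t => pvTokens.contains t)) = true
instance (i : Int) (nb_num_token : Int) (selfies_token : List String) : Decidable (Pre_calculate_len_connect i nb_num_token selfies_token) := by unfold Pre_calculate_len_connect; infer_instance

def pvWitness_calculate_len_connect : Int × Int × List String := (0, 2, ["[C]", "[N]", "[Ring1]"])

def Spec_calculate_len_connect (i : Int) (nb_num_token : Int) (selfies_token : List String) (out : Int × List Int) : Prop := out = calculate_len_connect_alt i nb_num_token selfies_token
instance (i : Int) (nb_num_token : Int) (selfies_token : List String) (out : Int × List Int) : Decidable (Spec_calculate_len_connect i nb_num_token selfies_token out) := by unfold Spec_calculate_len_connect; infer_instance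

-- ===== CLAIM (what is proved, stated in full; the proofs are below) =====
def Claim_equal_calculate_len_connect : Prop := ∀ (i : Int) (nb_num_token : Int) (selfies_token : List String), Dom_calculate_len_connect i nb_num_token selfies_token → Pre_calculate_len_connect i nb_num_token selfies_token → Spec_calculate_len_connect i nb_num_token selfies_token (calculate_len_connect i nb_num_token selfies_token)

-- ===== LEMMAS AND PROOFS =====

theorem pvDicts_eq : pvNumDictB = pvNumDictA := rfl

-- a token in pvTokens always has a dict value
theorem pv_get_of_contains (t : String) (h : pvTokens.contains t = true) :
    ∃ v : Int, pvNumDictA.get? t = some v := by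
  simp [pvTokens, List.contains_eq_mem] at h
  rcases h with h | h | h | h | h | h | h | h | h | h | h | h | h | h | h | h <;>
    subst h <;> exact ⟨_, rfl⟩

theorem main_lemma (i nb : Int) (st : List String)
    (hPre : Pre_calculate_len_connect i nb st) (m : Nat) (hm : (m : Int) ≤ nb) :
    ∃ num : Int,
      pvGoB i st m = some (num, PySem.List.pyRange (i + 1) (i + (m : Int) + 1) 1) ∧
      ((PySem.List.pyRange 1 ((m : Int) + 1) 1).foldl
        (fun acc j =>
          match acc with
          | none => none
          | some (num, skip_idx) =>
            match PySem.List.pyGet? st (i + j) with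
            | none => none
            | some tok =>
              match get_numeric_value tok with
              | none => none
              | some v => some (num + v * 16 ^ (nb - j).toNat, skip_idx ++ [i + j]))
        (some ((0 : Int), ([] : List Int)))) =
        some (num * 16 ^ (nb.toNat - m), PySem.List.pyRange (i + 1) (i + (m : Int) + 1) 1) := by
  induction m with
  | zero =>
    refine ⟨0, ?_, ?_⟩
    · rw [PySem.List.pyRange_one_eq_nil (by omega)]
      rfl
    · simp only [Nat.cast_zero]
      rw [PySem.List.pyRange_one_eq_nil (by omega),
          PySem.List.pyRange_one_eq_nil (by omega)]
      simp
  | succ m ih =>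
    obtain ⟨num, hB, hA⟩ := ih (by omega)
    have hmem : ((m : Int) + 1) ∈ PySem.List.pyRange 1 (nb + 1) 1 := by
      rw [PySem.List.mem_pyRange_one]; omega
    have hj := List.all_eq_true.mp hPre.2 _ hmem
    rcases hg : PySem.List.pyGet? st (i + ((m : Int) + 1)) with _ | tok
    · rw [hg] at hj; simp at hj
    rw [hg] at hj
    simp only at hj
    obtain ⟨v, hv⟩ := pv_get_of_contains tok hj
    refine ⟨num * 16 + v, ?_, ?_⟩
    · show pvGoB i st (m + 1) = _
      rw [pvGoB, hB, hg, pvDicts_eq]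
      simp only [hv, Nat.cast_add, Nat.cast_one, Option.some.injEq, Prod.mk.injEq]
      refine ⟨trivial, ?_⟩
      rw [show i + ((m : Int) + 1) + 1 = (i + (m : Int) + 1) + 1 from by ring,
          PySem.List.pyRange_one_succ_right (show i + 1 ≤ i + (m : Int) + 1 by omega)]
      simp [add_assoc]
    · have h1 : ((((m : Nat) + 1 : Nat) : Int) + 1) = ((m : Int) + 1) + 1 := by push_cast; ring
      rw [h1, PySem.List.pyRange_one_succ_right (by omega), List.foldl_append, hA]
      simp only [List.foldl]
      rw [hg]
      simp only [get_numeric_value, hv]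
      have hexp : (nb - ((m : Int) + 1)).toNat = nb.toNat - (m + 1) := by omega
      have hpow : (16 : Int) ^ (nb.toNat - m) = 16 ^ (nb.toNat - (m + 1)) * 16 := by
        rw [← pow_succ]; congr 1; omega
      simp only [Option.some.injEq, Prod.mk.injEq]
      refine ⟨by rw [hexp, hpow]; ring, ?_⟩
      have h2 : i + (((m : Nat) + 1 : Nat) : Int) + 1 = (i + (m : Int) + 1) + 1 := by
        push_cast; ring
      have h3 : i + ((m : Int) + 1) = i + (m : Int) + 1 := by ring
      rw [h2, h3]
      conv_rhs => rw [PySem.List.pyRange_one_succ_right (show i + 1 ≤ i + (m : Int) + 1 by omega)]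

-- ===== VERDICT (by name: the statement is the Claim_ definition above) =====
theorem calculate_len_connect_spec : Claim_equal_calculate_len_connect := by
  intro i nb st _ hPre
  unfold Spec_calculate_len_connect calculate_len_connect calculate_len_connect_alt
  by_cases hnb : nb ≤ 0
  · rw [PySem.List.pyRange_one_eq_nil (by omega)]
    have : nb.toNat = 0 := by omega
    rw [this]
    rfl
  · obtain ⟨num, hB, hA⟩ := main_lemma i nb st hPre nb.toNat (by omega)
    have hcast : ((nb.toNat : Int)) = nb := by omega
    rw [hcast] at hB hA
    simp only [hB, hA]
    simp
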